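-- pv_equiv track=rewrite | github.com/pauldebdeep9/Panasonic-IDS | extraction/torch_deps.py | get_text_w_pairs
-- ===== SOURCE A (Python) =====
-- def get_text_w_pairs(tokens, ce_list):
--     """
--     tokens [list] : White-space separated list of word tokens.
--     ce_list [list] : List of Cause-Effect tags. Either in ['C','E','O'] format, or BIO-format ['B-C','I-C'...]
--     """
--
--     # Sanity check
--     assert(len(tokens)==len(ce_list))
--
--     # Loop per token
--     curr_ce = prev_ce = None
--     for i, (tok, ce) in enumerate(zip(tokens, ce_list)):
--
--         curr_ce = ce.split('-')[-1]
--
--         if curr_ce!=prev_ce: # we only need to tag BOUNDARIES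
--
--             # opening
--             if curr_ce=='C':
--                 tokens[i]='<ARG0>'+tok
--             elif curr_ce=='E':
--                 tokens[i]='<ARG1>'+tok
--
--             # closing
--             if prev_ce=='C':
--                 tokens[i-1]=tokens[i-1]+'</ARG0>'
--             elif prev_ce=='E':
--                 tokens[i-1]=tokens[i-1]+'</ARG1>'
--
--         # update
--         prev_ce = curr_ce
--
--     # LAST closure
--     if prev_ce=='C':
--         tokens[i]=tokens[i]+'</ARG0>'
--     elif prev_ce=='E':
--         tokens[i]=tokens[i]+'</ARG1>'
--
--     return ' '.join(tokens)
-- ===== SOURCE B (Python) =====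
-- def get_text_w_pairs(tokens, ce_list):
--     """Pure per-token tagging: each token's opening/closing tag is decided locally
--     from its own simplified label and those of its neighbours (no running state)."""
--     assert(len(tokens) == len(ce_list))
--     labs = [ce.split('-')[-1] for ce in ce_list]
--     opens = {'C': '<ARG0>', 'E': '<ARG1>'}
--     closes = {'C': '</ARG0>', 'E': '</ARG1>'}
--     prevs = [None] + labs[:-1]
--     nexts = labs[1:] + [None]
--     for i, (tok, lab, p, nx) in enumerate(zip(tokens, labs, prevs, nexts)):
--         pre = opens.get(lab, '') if lab != p else ''
--         suf = closes.get(lab, '') if lab != nx else ''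
--         tokens[i] = pre + tok + suf
--     return ' '.join(tokens)
-- ===== Notes on version B (the rewrite author's own statement) =====
-- stated objective: simpler
-- what changed: A threads mutable state (prev label, boundary writes to i and i-1, plus a trailing closure step) through one stateful scan; B precomputes the simplified labels once and tags every token independently and purely from its own label and its two neighbours' labels, with no running state and no after-loop fixup.
import Mathlib
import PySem

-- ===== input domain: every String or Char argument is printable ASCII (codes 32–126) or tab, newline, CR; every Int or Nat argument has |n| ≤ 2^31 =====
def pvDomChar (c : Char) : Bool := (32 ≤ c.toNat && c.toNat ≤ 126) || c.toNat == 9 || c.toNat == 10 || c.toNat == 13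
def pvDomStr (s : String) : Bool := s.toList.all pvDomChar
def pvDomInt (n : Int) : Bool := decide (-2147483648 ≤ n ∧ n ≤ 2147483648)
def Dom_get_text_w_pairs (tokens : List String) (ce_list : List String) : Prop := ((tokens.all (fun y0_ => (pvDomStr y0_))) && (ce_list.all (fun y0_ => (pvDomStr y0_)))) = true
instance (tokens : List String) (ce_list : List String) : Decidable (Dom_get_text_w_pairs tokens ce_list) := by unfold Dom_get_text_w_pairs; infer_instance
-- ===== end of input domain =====

-- B replaces A's stateful boundary-mutating scan by a pure per-token tagging from neighbour
-- labels (objective: simpler). Both A and B mutate `tokens` in place in Python, to the same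
-- final contents; the theorems below are about the returned string.

-- ===== PORT A =====

-- ce.split('-')[-1]; split never returns an empty list, so the [-1] index is always valid
-- (the .getD "" default is never reached).
def simpLabA (ce : String) : String :=
  (PySem.List.pyGet? ((PySem.Str.split? ce "-").getD []) (-1)).getD ""

-- the for-loop of A: state = (tokens being mutated, prev_ce, next enumerate index i).
-- Python's tokens[i-1] is only evaluated when prev_ce is not None, i.e. i ≥ 1, so the
-- Nat subtraction i-1 is exact.
def gtwpLoopA : List String → Option String → Nat → List (String × String) → (List String × Option String)
  | toks, prev, _, [] => (toks, prev)
  | toks, prev, i, (tok, ce) :: rest =>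
    let curr := simpLabA ce
    let toks1 :=
      if some curr ≠ prev then
        let t1 :=
          if curr = "C" then toks.set i ("<ARG0>" ++ tok)
          else if curr = "E" then toks.set i ("<ARG1>" ++ tok)
          else toks
        if prev = some "C" then t1.set (i-1) ((t1.getD (i-1) "") ++ "</ARG0>")
        else if prev = some "E" then t1.set (i-1) ((t1.getD (i-1) "") ++ "</ARG1>")
        else t1
      else toks
    gtwpLoopA toks1 (some curr) (i+1) rest

def get_text_w_pairs (tokens : List String) (ce_list : List String) : String :=
  -- the assert is Pre_get_text_w_pairs; after the loop Python's i is the last enumerate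
  -- index, tokens.length - 1 (the LAST-closure branch only fires when the loop ran).
  let st := gtwpLoopA tokens none 0 (tokens.zip ce_list)
  let i := tokens.length - 1
  let toks2 :=
    if st.2 = some "C" then st.1.set i ((st.1.getD i "") ++ "</ARG0>")
    else if st.2 = some "E" then st.1.set i ((st.1.getD i "") ++ "</ARG1>")
    else st.1
  PySem.Str.join " " toks2

-- ===== PORT B =====

def simpLabB (ce : String) : String :=
  (PySem.List.pyGet? ((PySem.Str.split? ce "-").getD []) (-1)).getD ""

-- opens.get(lab, '') / closes.get(lab, '') on the two literal dicts
def openB (lab : String) : String :=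
  if lab = "C" then "<ARG0>" else if lab = "E" then "<ARG1>" else ""
def closeB (lab : String) : String :=
  if lab = "C" then "</ARG0>" else if lab = "E" then "</ARG1>" else ""

def get_text_w_pairs_alt (tokens : List String) (ce_list : List String) : String :=
  let labs := ce_list.map simpLabB
  let prevs : List (Option String) := none :: (labs.dropLast.map some)
  let nexts : List (Option String) := ((labs.drop 1).map some) ++ [none]
  let out := (((tokens.zip labs).zip prevs).zip nexts).map
    (fun p =>
      ((if some p.1.1.2 = p.1.2 then "" else openB p.1.1.2) ++ p.1.1.1) ++
        (if some p.1.1.2 = p.2 then "" else closeB p.1.1.2))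
  PySem.Str.join " " out

-- ===== PRECONDITION & SPEC =====
-- Pre_ excludes exactly the inputs where A's assert raises: unequal lengths.
def Pre_get_text_w_pairs (tokens : List String) (ce_list : List String) : Prop :=
  tokens.length = ce_list.length
instance (tokens : List String) (ce_list : List String) : Decidable (Pre_get_text_w_pairs tokens ce_list) := by unfold Pre_get_text_w_pairs; infer_instance

def pvWitness_get_text_w_pairs : List String × List String :=
  (["the", "rain", "caused", "the", "flood"], ["B-C", "I-C", "O", "B-E", "I-E"])

def Spec_get_text_w_pairs (tokens : List String) (ce_list : List String) (out : String) : Prop := out = get_text_w_pairs_alt tokens ce_list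
instance (tokens : List String) (ce_list : List String) (out : String) : Decidable (Spec_get_text_w_pairs tokens ce_list out) := by unfold Spec_get_text_w_pairs; infer_instance

-- ===== CLAIM (what is proved, stated in full; the proofs are below) =====
def Claim_equal_get_text_w_pairs : Prop := ∀ (tokens : List String) (ce_list : List String), Dom_get_text_w_pairs tokens ce_list → Pre_get_text_w_pairs tokens ce_list → Spec_get_text_w_pairs tokens ce_list (get_text_w_pairs tokens ce_list)

-- ===== LEMMAS AND PROOFS =====

-- pure (mutation-free) reformulations used as the bridge between the two ports
def preT (lab : String) (p : Option String) : String :=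
  if some lab = p then "" else openB lab
def sufT (lab : String) (n : Option String) : String :=
  if some lab = n then "" else closeB lab

-- B as a state-passing recursion over (token, label) pairs
def bPure : List (String × String) → Option String → List String
  | [], _ => []
  | (tok, lab) :: rest, p =>
      ((preT lab p ++ tok) ++ sufT lab (rest.head?.map Prod.snd)) :: bPure rest (some lab)

-- A's loop, mutation-free: pend is the entry for the previous token (opening applied,
-- closing still pending), plab its label
def loopPure : String → String → List (String × String) → List String
  | pend, _, [] => [pend]
  | pend, plab, (tok, lab) :: rest =>
      if lab = plab then pend :: loopPure tok plab rest
      else (pend ++ closeB plab) :: loopPure (openB lab ++ tok) lab rest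

def lastLab : String → List (String × String) → String
  | plab, [] => plab
  | _, (_, lab) :: rest => lastLab lab rest

-- append a string to the last element
def appLast (s : String) : List String → List String
  | [] => []
  | [a] => [a ++ s]
  | a :: b :: r => a :: appLast s (b :: r)

lemma simpLab_eq : simpLabA = simpLabB := rfl

lemma set_at_len (d : List String) (x v : String) (L : List String) :
    (d ++ x :: L).set d.length v = d ++ v :: L := by
  induction d with
  | nil => simp
  | cons a d ih => simp [List.set, ih]

lemma set_at_len1 (d : List String) (x y v : String) (L : List String) :
    (d ++ x :: y :: L).set (d.length + 1) v = d ++ x :: v :: L := by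
  have h := set_at_len (d ++ [x]) y v L
  simpa using h

lemma getD_at_len (d : List String) (x : String) (L : List String) :
    (d ++ x :: L).getD d.length "" = x := by
  induction d with
  | nil => simp
  | cons a d ih => simpa using ih

lemma loopPure_ne_nil (pend plab : String) (pairs : List (String × String)) :
    loopPure pend plab pairs ≠ [] := by
  cases pairs with
  | nil => simp [loopPure]
  | cons p rest =>
    obtain ⟨tok, lab⟩ := p
    by_cases h : lab = plab <;> simp [loopPure, h]

lemma length_loopPure (pend plab : String) (pairs : List (String × String)) :
    (loopPure pend plab pairs).length = pairs.length + 1 := by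
  induction pairs generalizing pend plab with
  | nil => simp [loopPure]
  | cons p rest ih =>
    obtain ⟨tok, lab⟩ := p
    by_cases h : lab = plab <;> simp [loopPure, h, ih]

lemma appLast_cons (s a : String) (L : List String) (hL : L ≠ []) :
    appLast s (a :: L) = a :: appLast s L := by
  cases L with
  | nil => exact absurd rfl hL
  | cons b r => rfl

-- the opening step of A's loop body, at index done.length + 1
lemma sub1 (curr tok : String) (d : List String) (x : String) (L : List String) :
    (if curr = "C" then (d ++ x :: tok :: L).set (d.length + 1) ("<ARG0>" ++ tok)
     else if curr = "E" then (d ++ x :: tok :: L).set (d.length + 1) ("<ARG1>" ++ tok)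
     else (d ++ x :: tok :: L))
    = d ++ x :: (openB curr ++ tok) :: L := by
  by_cases h1 : curr = "C"
  · simp [openB, h1, set_at_len1]
  · by_cases h2 : curr = "E"
    · simp [openB, h1, h2, set_at_len1]
    · simp [openB, h1, h2]

-- the closing step of A's loop body, at index done.length
lemma sub2 (plab : String) (d : List String) (x : String) (L : List String) :
    (if some plab = some "C" then
       (d ++ x :: L).set d.length (((d ++ x :: L).getD d.length "") ++ "</ARG0>")
     else if some plab = some "E" then
       (d ++ x :: L).set d.length (((d ++ x :: L).getD d.length "") ++ "</ARG1>")
     else (d ++ x :: L))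
    = d ++ (x ++ closeB plab) :: L := by
  by_cases h1 : plab = "C"
  · simp [closeB, h1, getD_at_len, set_at_len]
  · by_cases h2 : plab = "E"
    · simp [closeB, h1, h2, getD_at_len, set_at_len]
    · simp [closeB, h1, h2]

-- A's first iteration (index 0, prev = None): only the opening can fire
lemma sub0 (curr tok : String) (L : List String) :
    (if curr = "C" then (tok :: L).set 0 ("<ARG0>" ++ tok)
     else if curr = "E" then (tok :: L).set 0 ("<ARG1>" ++ tok)
     else (tok :: L))
    = (openB curr ++ tok) :: L := by
  by_cases h1 : curr = "C"
  · simp [openB, h1]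
  · by_cases h2 : curr = "E"
    · simp [openB, h1, h2]
    · simp [openB, h1, h2]

-- A's LAST-closure step equals appLast
lemma set_getD_last (L : List String) (s : String) (hL : L ≠ []) :
    L.set (L.length - 1) ((L.getD (L.length - 1) "") ++ s) = appLast s L := by
  induction L with
  | nil => exact absurd rfl hL
  | cons a T ih =>
    cases T with
    | nil => simp [appLast, List.set]
    | cons b r =>
      have hT : (b :: r : List String) ≠ [] := by simp
      have hlen : (a :: b :: r : List String).length - 1 = (b :: r : List String).length - 1 + 1 := by
        simp
      rw [appLast_cons s a (b :: r) hT, hlen]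
      simp only [List.set, List.getD, List.getElem?_cons_succ]
      rw [← ih hT]
      rfl

lemma appLast_empty (L : List String) : appLast "" L = L := by
  induction L with
  | nil => rfl
  | cons a T ih =>
    cases T with
    | nil => simp [appLast]
    | cons b r => rw [appLast_cons _ _ _ (by simp), ih]

lemma sub3 (plab : String) (L : List String) (hL : L ≠ []) :
    (if some plab = some "C" then L.set (L.length - 1) ((L.getD (L.length - 1) "") ++ "</ARG0>")
     else if some plab = some "E" then L.set (L.length - 1) ((L.getD (L.length - 1) "") ++ "</ARG1>")
     else L)
    = appLast (closeB plab) L := by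
  split_ifs with h1 h2
  · simp only [Option.some.injEq] at h1
    rw [set_getD_last L _ hL, h1, closeB]; simp
  · simp only [Option.some.injEq] at h2
    rw [set_getD_last L _ hL, h2, closeB]; simp
  · simp only [Option.some.injEq] at h1 h2
    rw [closeB]; simp only [h1, h2, if_false]
    exact (appLast_empty L).symm

-- the imperative loop computes loopPure on the unprocessed suffix
lemma loopA_eq (rest : List (String × String)) :
    ∀ (done : List String) (pend plab : String),
    gtwpLoopA (done ++ pend :: rest.map Prod.fst) (some plab) (done.length + 1) rest
    = (done ++ loopPure pend plab (rest.map (fun p => (p.1, simpLabA p.2))),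
       some (lastLab plab (rest.map (fun p => (p.1, simpLabA p.2))))) := by
  induction rest with
  | nil => intro done pend plab; simp [gtwpLoopA, loopPure, lastLab]
  | cons p rest ih =>
    intro done pend plab
    obtain ⟨tok, ce⟩ := p
    show gtwpLoopA (done ++ pend :: tok :: rest.map Prod.fst) (some plab) (done.length + 1)
        ((tok, ce) :: rest) = _
    by_cases hc : simpLabA ce = plab
    · -- same label: no writes
      have step : gtwpLoopA (done ++ pend :: tok :: rest.map Prod.fst) (some plab)
          (done.length + 1) ((tok, ce) :: rest)
          = gtwpLoopA (done ++ pend :: tok :: rest.map Prod.fst) (some (simpLabA ce))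
            (done.length + 1 + 1) rest := by
        simp [gtwpLoopA, hc]
      have harr : done ++ pend :: tok :: rest.map Prod.fst
          = (done ++ [pend]) ++ tok :: rest.map Prod.fst := by simp
      have hidx : done.length + 1 + 1 = (done ++ [pend]).length + 1 := by simp
      rw [step, hc, harr, hidx, ih (done ++ [pend]) tok plab]
      simp [loopPure, lastLab, hc]
    · -- boundary: open at index i, close at index i-1
      have step : gtwpLoopA (done ++ pend :: tok :: rest.map Prod.fst) (some plab)
          (done.length + 1) ((tok, ce) :: rest)
          = gtwpLoopA (done ++ (pend ++ closeB plab) :: (openB (simpLabA ce) ++ tok)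
              :: rest.map Prod.fst) (some (simpLabA ce)) (done.length + 1 + 1) rest := by
        rw [gtwpLoopA]
        rw [if_pos (by simp [hc])]
        rw [show done.length + 1 - 1 = done.length from rfl]
        rw [sub1 (simpLabA ce) tok done pend (rest.map Prod.fst)]
        rw [sub2 plab done pend ((openB (simpLabA ce) ++ tok) :: rest.map Prod.fst)]
      have harr : done ++ (pend ++ closeB plab) :: (openB (simpLabA ce) ++ tok) :: rest.map Prod.fst
          = (done ++ [pend ++ closeB plab]) ++ (openB (simpLabA ce) ++ tok) :: rest.map Prod.fst := by
        simp
      have hidx : done.length + 1 + 1 = (done ++ [pend ++ closeB plab]).length + 1 := by simp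
      rw [step, harr, hidx, ih (done ++ [pend ++ closeB plab]) (openB (simpLabA ce) ++ tok) (simpLabA ce)]
      simp [loopPure, lastLab, hc]

-- appLast ∘ loopPure is bPure (the A-side run equals the B-side pure tagging)
lemma AB (pairs : List (String × String)) :
    ∀ (plab pend : String),
    appLast (closeB (lastLab plab pairs)) (loopPure pend plab pairs)
    = (pend ++ sufT plab (pairs.head?.map Prod.snd)) :: bPure pairs (some plab) := by
  induction pairs with
  | nil => intro plab pend; simp [loopPure, lastLab, bPure, appLast, sufT]
  | cons p rest ih =>
    intro plab pend
    obtain ⟨tok, lab⟩ := p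
    by_cases h : lab = plab
    · subst h
      rw [show lastLab lab ((tok, lab) :: rest) = lastLab lab rest from rfl]
      rw [show loopPure pend lab ((tok, lab) :: rest) = pend :: loopPure tok lab rest from by
        simp [loopPure]]
      rw [appLast_cons _ _ _ (loopPure_ne_nil tok lab rest), ih lab tok]
      simp [bPure, sufT, preT]
    · rw [show lastLab plab ((tok, lab) :: rest) = lastLab lab rest from rfl]
      rw [show loopPure pend plab ((tok, lab) :: rest)
          = (pend ++ closeB plab) :: loopPure (openB lab ++ tok) lab rest from by
        simp [loopPure, h]]
      rw [appLast_cons _ _ _ (loopPure_ne_nil (openB lab ++ tok) lab rest), ih lab (openB lab ++ tok)]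
      have h' : ¬ plab = lab := fun hh => h hh.symm
      simp [bPure, sufT, preT, h, h']

-- B's zipped map is bPure
lemma B_eq (tokens : List String) :
    ∀ (labs : List String) (p : Option String), tokens.length = labs.length →
    (((tokens.zip labs).zip (p :: labs.dropLast.map some)).zip
        ((labs.drop 1).map some ++ [none])).map
      (fun q =>
        ((if some q.1.1.2 = q.1.2 then "" else openB q.1.1.2) ++ q.1.1.1) ++
          (if some q.1.1.2 = q.2 then "" else closeB q.1.1.2))
    = bPure (tokens.zip labs) p := by
  induction tokens with
  | nil => intro labs p h; simp [bPure]
  | cons t ts ih =>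
    intro labs p h
    cases labs with
    | nil => simp at h
    | cons l ls =>
      cases ls with
      | nil =>
        cases ts with
        | nil => simp [bPure, preT, sufT]
        | cons t2 ts' => simp at h
      | cons l2 ls' =>
        cases ts with
        | nil => simp at h
        | cons t2 ts' =>
          have h' : (t2 :: ts').length = (l2 :: ls').length := by simpa using h
          have ihx := ih (l2 :: ls') (some l) h'
          show ((((t, l) :: (t2 :: ts').zip (l2 :: ls')).zip
              (p :: some l :: ((l2 :: ls').dropLast.map some))).zip
              (some l2 :: (((l2 :: ls').drop 1).map some ++ [none]))).map _ = _
          simp only [List.zip_cons_cons, List.map_cons] at ihx ⊢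
          rw [ihx]
          simp [bPure, preT, sufT]

-- ===== VERDICT (by name: the statement is the Claim_ definition above) =====
theorem get_text_w_pairs_spec : Claim_equal_get_text_w_pairs := by
  intro tokens ce_list _hdom hpre
  unfold Spec_get_text_w_pairs
  unfold Pre_get_text_w_pairs at hpre
  cases tokens with
  | nil =>
    cases ce_list with
    | nil => rfl
    | cons c cs => simp at hpre
  | cons t ts =>
    cases ce_list with
    | nil => simp at hpre
    | cons c cs =>
      have hlen : ts.length = cs.length := by simpa using hpre
      have hts : (ts.zip cs).map Prod.fst = ts := List.map_fst_zip (le_of_eq hlen)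
      -- the first iteration of A's loop (prev = None)
      have step1 : gtwpLoopA (t :: ts) none 0 ((t, c) :: ts.zip cs)
          = gtwpLoopA ((openB (simpLabA c) ++ t) :: ts) (some (simpLabA c)) 1 (ts.zip cs) := by
        rw [gtwpLoopA]
        rw [if_pos (Option.some_ne_none _)]
        rw [if_neg (by simp)]
        rw [if_neg (by simp)]
        rw [sub0]
      -- the remaining iterations
      have key := loopA_eq (ts.zip cs) [] (openB (simpLabA c) ++ t) (simpLabA c)
      simp only [List.nil_append, List.length_nil, Nat.zero_add, hts] at key
      have hm : (ts.zip cs).map (fun p => (p.1, simpLabA p.2)) = ts.zip (cs.map simpLabB) := by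
        rw [List.zip_map_right]
        exact List.map_congr_left fun p _ => rfl
      have hlenL : ts.length
          = (loopPure (openB (simpLabA c) ++ t) (simpLabA c)
              ((ts.zip cs).map (fun p => (p.1, simpLabA p.2)))).length - 1 := by
        rw [length_loopPure]
        simp [List.length_zip, ← hlen]
      -- A's side
      show PySem.Str.join " " _ = _
      rw [show ((t :: ts).zip (c :: cs)) = (t, c) :: ts.zip cs from rfl]
      rw [step1, key]
      simp only [List.length_cons, Nat.add_sub_cancel]
      rw [hlenL]
      rw [sub3 _ _ (loopPure_ne_nil _ _ _)]
      rw [AB]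
      -- B's side
      show _ = PySem.Str.join " " _
      rw [B_eq (t :: ts) ((c :: cs).map simpLabB) none (by simp [hlen])]
      rw [show ((t :: ts).zip ((c :: cs).map simpLabB))
          = (t, simpLabB c) :: ts.zip (cs.map simpLabB) from rfl]
      rw [hm]
      simp [bPure, preT, simpLab_eq]
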